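-- pv_equiv track=rewrite | github.com/dragranzer/Enkripsi-and-Hashing | aes.py | text2hexmatrix
-- ===== SOURCE A (Python) =====
-- def text2hexmatrix(plaintext):
--     text_matrix = [list(plaintext[i:i+4]) for i in range(0, len(plaintext), 4)]
--     hex_matrix = []
--     for i in text_matrix:
--         temp1D = []
--         for j in i:
--             temp1D.append(ord(j))
--
--         hex_matrix.append(temp1D)
--
--     return hex_matrix
-- ===== SOURCE B (Python) =====
-- def text2hexmatrix(plaintext):
--     hex_matrix = []
--     row = []
--     for c in plaintext:
--         row.append(ord(c))
--         if len(row) == 4: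
--             hex_matrix.append(row)
--             row = []
--     if row:
--         hex_matrix.append(row)
--     return hex_matrix
-- ===== Notes on version B (the rewrite author's own statement) =====
-- stated objective: alternative
-- what changed: B makes a single left-to-right pass over the characters with a running row accumulator that is flushed every 4 code points (plus a final flush), instead of A's two staged passes (slice the string into 4-char chunks by index arithmetic, then nested loops mapping ord over each chunk).
import Mathlib
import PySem

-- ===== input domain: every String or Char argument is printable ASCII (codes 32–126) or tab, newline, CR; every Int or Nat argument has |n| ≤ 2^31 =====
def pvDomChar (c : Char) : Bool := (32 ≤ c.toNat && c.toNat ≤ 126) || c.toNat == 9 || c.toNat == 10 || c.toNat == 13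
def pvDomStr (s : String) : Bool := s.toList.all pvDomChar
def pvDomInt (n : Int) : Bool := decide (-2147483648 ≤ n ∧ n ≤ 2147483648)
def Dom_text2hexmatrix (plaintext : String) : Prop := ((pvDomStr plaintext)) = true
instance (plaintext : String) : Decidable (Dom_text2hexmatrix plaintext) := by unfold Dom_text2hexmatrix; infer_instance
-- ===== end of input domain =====

-- B replaces A's two staged passes (index/slice chunking, then nested ord loops) by one
-- left-to-right pass with a running row accumulator flushed every 4 code points.

-- ===== PORT A =====
-- exact: plaintext[i:i+4] on a string is PySem.List.slice on its character list; list(...) of a string is that list.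
def text2hexmatrix (plaintext : String) : List (List Int) :=
  let cs := plaintext.toList
  let text_matrix : List (List Char) :=
    (PySem.List.pyRange 0 (cs.length : Int) 4).map
      (fun i => PySem.List.slice cs (some i) (some (i + 4)))
  text_matrix.foldl
    (fun hex_matrix row =>
      hex_matrix ++ [row.foldl (fun temp1D j => temp1D ++ [(j.toNat : Int)]) []])
    []

-- ===== PORT B =====
-- one fold over the characters carrying (finished rows, current row); final flush if the row is nonempty.
def text2hexmatrix_alt (plaintext : String) : List (List Int) :=
  let p : List (List Int) × List Int :=
    plaintext.toList.foldl
      (fun st c =>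
        let row := st.2 ++ [(c.toNat : Int)]
        if row.length == 4 then (st.1 ++ [row], []) else (st.1, row))
      ([], [])
  if p.2 ≠ [] then p.1 ++ [p.2] else p.1

-- ===== PRECONDITION & SPEC =====
def Spec_text2hexmatrix (plaintext : String) (out : List (List Int)) : Prop := out = text2hexmatrix_alt plaintext
instance (plaintext : String) (out : List (List Int)) : Decidable (Spec_text2hexmatrix plaintext out) := by unfold Spec_text2hexmatrix; infer_instance

-- ===== CLAIM =====
def Claim_equal_text2hexmatrix : Prop := ∀ (plaintext : String), Dom_text2hexmatrix plaintext → Spec_text2hexmatrix plaintext (text2hexmatrix plaintext)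

-- ===== LEMMAS AND PROOFS =====

-- common reference: code points of the string grouped into rows of four
def pvChunkOrd : List Char → List (List Int)
  | [] => []
  | a :: b :: c :: d :: rest =>
      [(a.toNat : Int), (b.toNat : Int), (c.toNat : Int), (d.toNat : Int)] :: pvChunkOrd rest
  | [a] => [[(a.toNat : Int)]]
  | [a, b] => [[(a.toNat : Int), (b.toNat : Int)]]
  | [a, b, c] => [[(a.toNat : Int), (b.toNat : Int), (c.toNat : Int)]]

theorem pvRange4_cons (n : Int) (h : 0 < n) :
    PySem.List.pyRange 0 n 4 = 0 :: (PySem.List.pyRange 0 (n - 4) 4).map (· + 4) := by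
  rw [PySem.List.pyRange_of_pos 0 n (by norm_num), PySem.List.pyRange_of_pos 0 (n - 4) (by norm_num)]
  by_cases h4 : 4 < n
  · have hif1 : (0 : Int) < n := h
    have hcount : ((n - 0 + 4 - 1) / 4).toNat = ((n - 4 - 0 + 4 - 1) / 4).toNat + 1 := by
      omega
    simp only [if_pos h, if_pos (by omega : (0:Int) < n - 4), hcount,
      List.range_succ_eq_map, List.map_cons, List.map_map]
    refine congrArg₂ List.cons (by norm_num) ?_
    apply List.map_congr_left; intro k _; simp [Function.comp]; ring
  · have hn4 : n - 4 ≤ 0 := by omega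
    have hcount : ((n - 0 + 4 - 1) / 4).toNat = 1 := by omega
    simp only [if_pos h, if_neg (by omega : ¬ (0:Int) < n - 4), hcount]
    simp

theorem pvChunkA (cs : List Char) :
    ((PySem.List.pyRange 0 (cs.length : Int) 4).map
        (fun i => PySem.List.slice cs (some i) (some (i + 4)))).map
      (List.map (fun c => (c.toNat : Int)))
      = pvChunkOrd cs := by
  induction cs using pvChunkOrd.induct with
  | case1 => simp [PySem.List.pyRange_of_pos 0 0 (by norm_num : (0:Int) < 4), pvChunkOrd]
  | case2 a b c d rest ih =>
      have hlen : ((a :: b :: c :: d :: rest).length : Int) = (rest.length : Int) + 4 := by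
        simp; ring
      rw [hlen, pvRange4_cons _ (by positivity)]
      have hsub : (rest.length : Int) + 4 - 4 = (rest.length : Int) := by ring
      rw [hsub]
      simp only [List.map_cons, List.map_map]
      rw [show pvChunkOrd (a :: b :: c :: d :: rest)
            = [(a.toNat : Int), (b.toNat : Int), (c.toNat : Int), (d.toNat : Int)] :: pvChunkOrd rest
          from rfl]
      refine congrArg₂ List.cons ?_ ?_
      · rw [PySem.List.slice_toNat _ (by norm_num) (by norm_num)]
        simp
      · rw [← ih]
        simp only [List.map_map]
        apply List.map_congr_left
        intro i hi
        have hmem := (PySem.List.mem_pyRange_iff_of_pos (by norm_num : (0:Int) < 4) i).mp hi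
        have hi0 : 0 ≤ i := hmem.1
        simp only [Function.comp]
        rw [PySem.List.slice_toNat _ (by omega) (by omega),
            PySem.List.slice_toNat _ (by omega) (by omega)]
        have h1 : (i + 4).toNat = i.toNat + 4 := by omega
        have h2 : (i + 4 + 4).toNat = (i + 4).toNat + 4 := by omega
        have h3 : (i + 4 + 4).toNat - (i + 4).toNat = 4 := by omega
        have h4 : (i + 4).toNat - i.toNat = 4 := by omega
        rw [h3, h4, h1]
        simp [List.drop_succ_cons]
  | case3 a =>
      simp [PySem.List.pyRange_of_pos 0 1 (by norm_num : (0:Int) < 4),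
        PySem.List.slice, PySem.List.clampIdx, pvChunkOrd]
  | case4 a b =>
      simp [PySem.List.pyRange_of_pos 0 2 (by norm_num : (0:Int) < 4),
        PySem.List.slice, PySem.List.clampIdx, pvChunkOrd]
  | case5 a b c =>
      simp [PySem.List.pyRange_of_pos 0 3 (by norm_num : (0:Int) < 4),
        PySem.List.slice, PySem.List.clampIdx, pvChunkOrd]

def pvStep (st : List (List Int) × List Int) (c : Char) : List (List Int) × List Int :=
  let row := st.2 ++ [(c.toNat : Int)]
  if row.length == 4 then (st.1 ++ [row], []) else (st.1, row)

theorem pvChunkB (cs : List Char) :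
    ∀ acc : List (List Int),
      (let p := cs.foldl pvStep (acc, []);
       if p.2 ≠ [] then p.1 ++ [p.2] else p.1) = acc ++ pvChunkOrd cs := by
  induction cs using pvChunkOrd.induct with
  | case1 => intro acc; simp [pvChunkOrd]
  | case2 a b c d rest ih =>
      intro acc
      have hfold : (a :: b :: c :: d :: rest).foldl pvStep (acc, [])
          = rest.foldl pvStep
              (acc ++ [[(a.toNat : Int), (b.toNat : Int), (c.toNat : Int), (d.toNat : Int)]], []) := by
        simp [List.foldl, pvStep]
      rw [hfold]
      rw [show pvChunkOrd (a :: b :: c :: d :: rest)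
            = [(a.toNat : Int), (b.toNat : Int), (c.toNat : Int), (d.toNat : Int)] :: pvChunkOrd rest
          from rfl]
      rw [ih]
      simp
  | case3 a => intro acc; simp [List.foldl, pvStep, pvChunkOrd]
  | case4 a b => intro acc; simp [List.foldl, pvStep, pvChunkOrd]
  | case5 a b c => intro acc; simp [List.foldl, pvStep, pvChunkOrd]

-- ===== VERDICT =====
theorem text2hexmatrix_spec : Claim_equal_text2hexmatrix := by
  intro s _
  unfold Spec_text2hexmatrix text2hexmatrix text2hexmatrix_alt
  dsimp only
  have hinner : ∀ row : List Char,
      row.foldl (fun temp1D j => temp1D ++ [(j.toNat : Int)]) []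
        = row.map (fun c => (c.toNat : Int)) := by
    intro row
    rw [PySem.List.foldl_append_singleton_eq_map (fun c : Char => (c.toNat : Int))]
    simp
  calc List.foldl
          (fun hex_matrix row => hex_matrix ++ [List.foldl (fun temp1D j => temp1D ++ [(j.toNat : Int)]) [] row])
          []
          ((PySem.List.pyRange 0 (s.toList.length : Int) 4).map
            (fun i => PySem.List.slice s.toList (some i) (some (i + 4))))
      = [] ++ ((PySem.List.pyRange 0 (s.toList.length : Int) 4).map
            (fun i => PySem.List.slice s.toList (some i) (some (i + 4)))).map
            (fun row => List.foldl (fun temp1D j => temp1D ++ [(j.toNat : Int)]) [] row) :=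
        PySem.List.foldl_append_singleton_eq_map
          (fun row : List Char => List.foldl (fun temp1D j => temp1D ++ [(j.toNat : Int)]) [] row) _ []
    _ = ((PySem.List.pyRange 0 (s.toList.length : Int) 4).map
            (fun i => PySem.List.slice s.toList (some i) (some (i + 4)))).map
            (List.map (fun c => (c.toNat : Int))) := by
        simp only [List.nil_append]
        apply List.map_congr_left; intro row _; exact hinner row
    _ = pvChunkOrd s.toList := pvChunkA s.toList
    _ = [] ++ pvChunkOrd s.toList := by simp
    _ = (let p := s.toList.foldl pvStep ([], []);
         if p.2 ≠ [] then p.1 ++ [p.2] else p.1) := (pvChunkB s.toList []).symm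
    _ = _ := rfl
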